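-- pv_equiv track=rewrite | github.com/danagle/advent-of-code | 2023/15/solution.py | box_lenses
-- ===== SOURCE A (Python) =====
-- def get_hash_value(step):
--     value = 0
--     for ch in step:
--         value = ((value + ord(ch)) * 17) % 256
--     return value
--
-- def box_lenses(equations_list):
--     lens_boxes = [dict() for _ in range(256)]
--     for equation in equations_list:
--         if "-" == equation[-1]:
--             label = equation[:-1]
--             lens_boxes[get_hash_value(label)].pop(label, None)
--         else:
--             label, focal_length = equation.split("=")
--             lens_boxes[get_hash_value(label)][label] = int(focal_length)
--     return lens_boxes
-- ===== SOURCE B (Python) =====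
-- def _hash(label):
--     h = 0
--     for ch in label:
--         h = ((h + ord(ch)) * 17) % 256
--     return h
--
-- def box_lenses(equations_list):
--     # Offline two-pass reconstruction instead of simulating box mutations:
--     # pass 1 records, per label, the index of its last removal and the focal
--     # length of its last install; pass 2 places each surviving label exactly
--     # once, at its first install that comes after its last removal, which is
--     # the position Python's dict semantics give it in A.
--     last_remove = {}
--     last_value = {}
--     for i, equation in enumerate(equations_list):
--         if equation[-1] == "-":
--             last_remove[equation[:-1]] = i
--         else:
--             label, focal = equation.split("=")
--             last_value[label] = int(focal)
--     boxes = [dict() for _ in range(256)]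
--     placed = set()
--     for i, equation in enumerate(equations_list):
--         if equation[-1] != "-":
--             label = equation.split("=")[0]
--             if label not in placed and i > last_remove.get(label, -1):
--                 boxes[_hash(label)][label] = last_value[label]
--                 placed.add(label)
--     return boxes
-- ===== Notes on version B (the rewrite author's own statement) =====
-- stated objective: alternative
-- what changed: B replaces A's online simulation of box mutations by an offline two-pass reconstruction: pass 1 records per label the index of its last removal and the focal of its last install, pass 2 places each surviving label exactly once, at its first install after its last removal, which reproduces Python's dict insertion-order semantics; each label is hashed at most once.
import Mathlib
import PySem

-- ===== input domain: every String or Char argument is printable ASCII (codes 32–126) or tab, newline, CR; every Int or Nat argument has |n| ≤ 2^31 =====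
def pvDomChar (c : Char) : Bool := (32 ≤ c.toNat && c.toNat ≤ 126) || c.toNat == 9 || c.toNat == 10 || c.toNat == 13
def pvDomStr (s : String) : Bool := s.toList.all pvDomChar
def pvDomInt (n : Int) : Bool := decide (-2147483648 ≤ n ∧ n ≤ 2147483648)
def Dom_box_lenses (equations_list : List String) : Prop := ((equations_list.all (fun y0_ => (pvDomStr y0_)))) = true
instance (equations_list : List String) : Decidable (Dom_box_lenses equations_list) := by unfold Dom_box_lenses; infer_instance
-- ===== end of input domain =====

-- B replaces A's online simulation of the 256 boxes by an offline two-pass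
-- reconstruction (pass 1: per-label last-removal index and last focal; pass 2:
-- place each surviving label once, at its first install after its last removal);
-- objective: alternative algorithm, same cost.

-- ===== PORT A =====
-- exact: Python's value stays a nonnegative int < 256 throughout, so Nat arithmetic agrees
def get_hash_value (step : String) : Nat :=
  step.toList.foldl (fun value ch => ((value + ch.toNat) * 17) % 256) 0

def boxStepA (lens_boxes : List (PySem.Dict String Int)) (equation : String) :
    List (PySem.Dict String Int) :=
  if PySem.Str.pyGet? equation (-1) = some '-' then
    let label := PySem.Str.slice equation none (some (-1))
    let h := get_hash_value label
    lens_boxes.set h ((lens_boxes.getD h PySem.Dict.empty).erase label)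
  else
    match PySem.Str.split? equation "=" with
    | some [label, focal_length] =>
        let h := get_hash_value label
        lens_boxes.set h ((lens_boxes.getD h PySem.Dict.empty).insert label
          ((PySem.Int.ofStr? focal_length).getD 0))
    | _ => lens_boxes   -- Python raises ValueError here; excluded by Pre_

def box_lenses (equations_list : List String) : List (List (String × Int)) :=
  (equations_list.foldl boxStepA (List.replicate 256 PySem.Dict.empty)).map PySem.Dict.items

-- ===== PORT B =====
def hashB (label : String) : Nat :=
  label.toList.foldl (fun h ch => ((h + ch.toNat) * 17) % 256) 0

-- pass 1: per label, index of its last '-' op and focal of its last '=' op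
def pass1Step (st : PySem.Dict String Int × PySem.Dict String Int) (ie : Int × String) :
    PySem.Dict String Int × PySem.Dict String Int :=
  if PySem.Str.pyGet? ie.2 (-1) = some '-' then
    (st.1.insert (PySem.Str.slice ie.2 none (some (-1))) ie.1, st.2)
  else
    match PySem.Str.split? ie.2 "=" with
    | some [label, focal] => (st.1, st.2.insert label ((PySem.Int.ofStr? focal).getD 0))
    | _ => st   -- Python raises ValueError here; excluded by Pre_

-- pass 2: place a label at its first '=' op after its last '-' op
def pass2Step (last_remove last_value : PySem.Dict String Int)
    (st : List (PySem.Dict String Int) × PySem.Set String) (ie : Int × String) :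
    List (PySem.Dict String Int) × PySem.Set String :=
  if PySem.Str.pyGet? ie.2 (-1) = some '-' then st
  else
    match PySem.Str.split? ie.2 "=" with
    | some (label :: _) =>
        if PySem.Set.contains st.2 label = false ∧ ie.1 > last_remove.getD label (-1) then
          (st.1.set (hashB label)
             ((st.1.getD (hashB label) PySem.Dict.empty).insert label (last_value.getD label 0)),
           PySem.Set.add st.2 label)
        else st
    | _ => st   -- unreachable: split with a nonempty separator is never empty

def box_lenses_alt (equations_list : List String) : List (List (String × Int)) :=
  let p1 := (PySem.List.enumerate equations_list).foldl pass1Step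
    (PySem.Dict.empty, PySem.Dict.empty)
  let st := (PySem.List.enumerate equations_list).foldl (pass2Step p1.1 p1.2)
    (List.replicate 256 PySem.Dict.empty, PySem.Set.empty)
  st.1.map PySem.Dict.items

-- ===== PRECONDITION & SPEC =====
def eqOk (equation : String) : Bool :=
  match PySem.Str.split? equation "=" with
  | some [_, focal] => (PySem.Int.ofStr? focal).isSome
  | _ => false

-- Pre_ excludes exactly the inputs on which Python A raises: an empty equation
-- (IndexError on equation[-1]) and a non-'-'-terminated equation whose split("=")
-- does not give exactly two parts or whose focal part int() cannot parse (ValueError).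
def Pre_box_lenses (equations_list : List String) : Prop :=
  ∀ equation ∈ equations_list, equation ≠ "" ∧
    (PySem.Str.pyGet? equation (-1) = some '-' ∨ eqOk equation = true)

instance (equations_list : List String) : Decidable (Pre_box_lenses equations_list) := by
  unfold Pre_box_lenses; infer_instance

def pvWitness_box_lenses : List String := ["ab=3", "cd-", "ab=5", "qp=-1"]

def Spec_box_lenses (equations_list : List String) (out : List (List (String × Int))) : Prop :=
  out = box_lenses_alt equations_list
instance (equations_list : List String) (out : List (List (String × Int))) :
    Decidable (Spec_box_lenses equations_list out) := by unfold Spec_box_lenses; infer_instance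

-- ===== CLAIM (what is proved, stated in full; the proofs are below) =====
def Claim_equal_box_lenses : Prop := ∀ (equations_list : List String),
  Dom_box_lenses equations_list → Pre_box_lenses equations_list →
  Spec_box_lenses equations_list (box_lenses equations_list)


-- ===== LEMMAS AND PROOFS =====

theorem dictContainsEraseNe (d : PySem.Dict String Int) (k m : String) (h : m ≠ k) :
    (d.erase k).contains m = d.contains m := by
  simp only [PySem.Dict.erase, PySem.Dict.contains, List.any_filter]
  apply PySem.List.any_congr_mem
  intro p _
  by_cases hp : p.1 = m
  · simp [hp, h]
  · simp [hp]

theorem dictEraseInsertSelf (d : PySem.Dict String Int) (k : String) (v : Int) :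
    (d.insert k v).erase k = d.erase k := by
  apply PySem.Dict.ext
  by_cases hc : d.contains k = true
  · show ((d.insert k v).erase k).items = _
    simp only [PySem.Dict.erase, PySem.Dict.items_insert_of_contains d v hc, List.filter_map]
    rw [List.filter_congr (q := fun p => !(p.1 == k)) ?_]
    · rw [List.map_congr_left (g := id) ?_, List.map_id]
      intro p hp
      have := (List.mem_filter.mp hp).2
      simp at this
      simp [this]
    · intro p _
      by_cases hp : p.1 = k <;> simp [hp]
  · have hc' : d.contains k = false := by simpa using hc
    show ((d.insert k v).erase k).items = _
    simp only [PySem.Dict.erase, PySem.Dict.items_insert_of_not_contains d v hc']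
    simp

theorem dictEraseInsertNe (d : PySem.Dict String Int) (k m : String) (w : Int) (h : m ≠ k) :
    (d.insert m w).erase k = (d.erase k).insert m w := by
  apply PySem.Dict.ext
  have hce := dictContainsEraseNe d k m h
  by_cases hc : d.contains m = true
  · show ((d.insert m w).erase k).items = ((d.erase k).insert m w).items
    rw [PySem.Dict.items_insert_of_contains _ w (hce.trans hc)]
    simp only [PySem.Dict.erase, PySem.Dict.items_insert_of_contains d w hc, List.filter_map]
    rw [List.filter_congr (q := fun p => !(p.1 == k)) ?_]
    intro p _
    by_cases hp : p.1 = m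
    · simp [hp]
    · simp [hp]
  · have hc' : d.contains m = false := by simpa using hc
    show ((d.insert m w).erase k).items = ((d.erase k).insert m w).items
    rw [PySem.Dict.items_insert_of_not_contains _ w (hce.trans hc')]
    simp only [PySem.Dict.erase, PySem.Dict.items_insert_of_not_contains d w hc']
    simp [h]

theorem dictContainsInsertNe (d : PySem.Dict String Int) (k m : String) (v : Int) (h : m ≠ k) :
    (d.insert k v).contains m = d.contains m := by
  rw [PySem.Dict.contains_insert]
  simp [h]

theorem dictInsertCommOfContains (d : PySem.Dict String Int) (k m : String) (v w : Int)
    (hc : d.contains k = true) (h : m ≠ k) :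
    (d.insert k v).insert m w = (d.insert m w).insert k v := by
  apply PySem.Dict.ext
  have h1 : (d.insert k v).contains m = d.contains m := dictContainsInsertNe d k m v h
  have h2 : (d.insert m w).contains k = d.contains k :=
    dictContainsInsertNe d m k w (fun he => h he.symm)
  by_cases hm : d.contains m = true
  · show ((d.insert k v).insert m w).items = ((d.insert m w).insert k v).items
    rw [PySem.Dict.items_insert_of_contains _ w (h1.trans hm),
        PySem.Dict.items_insert_of_contains _ v (h2.trans hc),
        PySem.Dict.items_insert_of_contains d v hc,
        PySem.Dict.items_insert_of_contains d w hm, List.map_map, List.map_map]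
    apply List.map_congr_left
    intro p _
    by_cases hp : p.1 = k
    · have hpm : ¬ p.1 = m := by rw [hp]; exact fun he => h he.symm
      have hkm : ¬ k = m := fun he => h he.symm
      simp [Function.comp, hp, hkm]
    · by_cases hpm : p.1 = m
      · simp [Function.comp, hpm, h]
      · simp [Function.comp, hp, hpm]
  · have hm' : d.contains m = false := by simpa using hm
    show ((d.insert k v).insert m w).items = ((d.insert m w).insert k v).items
    rw [PySem.Dict.items_insert_of_not_contains _ w (h1.trans hm'),
        PySem.Dict.items_insert_of_contains _ v (h2.trans hc),
        PySem.Dict.items_insert_of_contains d v hc,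
        PySem.Dict.items_insert_of_not_contains d w hm', List.map_append]
    congr 1
    have hmk : ¬ m = k := h
    simp [hmk]

theorem setContainsAdd (s : PySem.Set String) (x m : String) :
    (PySem.Set.add s x).contains m = (decide (m = x) || s.contains m) := by
  simp only [PySem.Set.add, PySem.Set.contains]
  by_cases hc : List.contains s x = true
  · simp only [hc, if_pos]
    by_cases hm : m = x
    · subst hm; simp_all
    · simp [hm]
  · simp only [hc, if_neg, Bool.false_eq_true, not_false_iff, List.contains_append,
      List.contains_cons, List.contains_nil]
    by_cases hm : m = x
    · subst hm; simp_all
    · simp [hm, beq_iff_eq]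

theorem listGetDSetSelf {α : Type} (l : List α) (i : Nat) (x d : α) (h : i < l.length) :
    (l.set i x).getD i d = x := by
  simp [List.getD, h]

theorem listGetDSetNe {α : Type} (l : List α) (i j : Nat) (x d : α) (h : i ≠ j) :
    (l.set i x).getD j d = l.getD j d := by
  simp [List.getD, List.getElem?_set_ne h]

theorem hashB_eq : hashB = get_hash_value := rfl

theorem hash_lt_aux (cs : List Char) : ∀ acc : Nat, acc < 256 →
    cs.foldl (fun value ch => ((value + ch.toNat) * 17) % 256) acc < 256 := by
  induction cs with
  | nil => intro acc h; exact h
  | cons c t ih =>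
    intro acc _
    exact ih _ (Nat.mod_lt _ (by omega))

theorem hash_lt (s : String) : get_hash_value s < 256 :=
  hash_lt_aux s.toList 0 (by omega)

-- one step of pass 2 on a removal equation is a no-op
theorem pass2Step_rem (lr lv : PySem.Dict String Int)
    (st : List (PySem.Dict String Int) × PySem.Set String) (q : Int × String)
    (h : PySem.Str.pyGet? q.2 (-1) = some '-') : pass2Step lr lv st q = st := by
  simp only [pass2Step]
  rw [if_pos h]

-- helper: setting box K with an install of label (≠ l) commutes with the erase-l view of box H
theorem boxRelRem (b : List (PySem.Dict String Int)) (hlen : b.length = 256)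
    (l label : String) (w : Int) (hne : label ≠ l) :
    ((b.set (get_hash_value l) ((b.getD (get_hash_value l) PySem.Dict.empty).erase l)).set
        (get_hash_value label)
        (((b.set (get_hash_value l) ((b.getD (get_hash_value l) PySem.Dict.empty).erase l)).getD
            (get_hash_value label) PySem.Dict.empty).insert label w))
      = (b.set (get_hash_value label)
            ((b.getD (get_hash_value label) PySem.Dict.empty).insert label w)).set
          (get_hash_value l)
          (((b.set (get_hash_value label)
              ((b.getD (get_hash_value label) PySem.Dict.empty).insert label w)).getD
             (get_hash_value l) PySem.Dict.empty).erase l) := by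
  have hH : get_hash_value l < b.length := hlen ▸ hash_lt l
  by_cases hK : get_hash_value label = get_hash_value l
  · rw [hK]
    rw [listGetDSetSelf b _ _ _ hH, listGetDSetSelf b _ _ _ hH, List.set_set, List.set_set,
      dictEraseInsertNe _ _ _ _ hne]
  · rw [listGetDSetNe b _ _ _ _ (Ne.symm hK), listGetDSetNe b _ _ _ _ hK,
      List.set_comm _ _ (Ne.symm hK)]

-- helper: setting box K with an install of label (≠ l) commutes with the insert-l view of box H
theorem boxRelIns (b : List (PySem.Dict String Int)) (hlen : b.length = 256)
    (l label : String) (v w : Int) (hne : label ≠ l)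
    (hcont : (b.getD (get_hash_value l) PySem.Dict.empty).contains l = true) :
    ((b.set (get_hash_value l) ((b.getD (get_hash_value l) PySem.Dict.empty).insert l v)).set
        (get_hash_value label)
        (((b.set (get_hash_value l)
            ((b.getD (get_hash_value l) PySem.Dict.empty).insert l v)).getD
            (get_hash_value label) PySem.Dict.empty).insert label w))
      = (b.set (get_hash_value label)
            ((b.getD (get_hash_value label) PySem.Dict.empty).insert label w)).set
          (get_hash_value l)
          (((b.set (get_hash_value label)
              ((b.getD (get_hash_value label) PySem.Dict.empty).insert label w)).getD
             (get_hash_value l) PySem.Dict.empty).insert l v) := by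
  have hH : get_hash_value l < b.length := hlen ▸ hash_lt l
  by_cases hK : get_hash_value label = get_hash_value l
  · rw [hK]
    rw [listGetDSetSelf b _ _ _ hH, listGetDSetSelf b _ _ _ hH, List.set_set, List.set_set,
      dictInsertCommOfContains _ _ _ _ _ hcont hne]
  · rw [listGetDSetNe b _ _ _ _ (Ne.symm hK), listGetDSetNe b _ _ _ _ hK,
      List.set_comm _ _ (Ne.symm hK)]

-- the pass-2 box/placed-set relation maintained while a final removal op is appended
theorem remRun (lr lv : PySem.Dict String Int) (l : String) (n : Int)
    (L : List (Int × String)) (hIdx : ∀ q ∈ L, q.1 < n) :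
    ∀ (b b' : List (PySem.Dict String Int)) (p p' : PySem.Set String),
      b.length = 256 →
      b' = b.set (get_hash_value l) ((b.getD (get_hash_value l) PySem.Dict.empty).erase l) →
      (∀ m, m ≠ l → p'.contains m = p.contains m) →
      p'.contains l = false →
      (L.foldl (pass2Step (lr.insert l n) lv) (b', p')).1
        = (L.foldl (pass2Step lr lv) (b, p)).1.set (get_hash_value l)
            (((L.foldl (pass2Step lr lv) (b, p)).1.getD (get_hash_value l)
                PySem.Dict.empty).erase l)
      ∧ (∀ m, m ≠ l → (L.foldl (pass2Step (lr.insert l n) lv) (b', p')).2.contains m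
            = (L.foldl (pass2Step lr lv) (b, p)).2.contains m)
      ∧ (L.foldl (pass2Step (lr.insert l n) lv) (b', p')).2.contains l = false := by
  induction L with
  | nil => intro b b' p p' _ hb' hp hpl; exact ⟨hb', hp, hpl⟩
  | cons q L ih =>
    intro b b' p p' hlen hb' hp hpl
    have hH : get_hash_value l < 256 := hash_lt l
    by_cases hminus : PySem.Str.pyGet? q.2 (-1) = some '-'
    · rw [List.foldl_cons, List.foldl_cons, pass2Step_rem _ _ _ _ hminus,
        pass2Step_rem _ _ _ _ hminus]
      exact ih (fun r hr => hIdx r (List.mem_cons_of_mem _ hr)) b b' p p' hlen hb' hp hpl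
    · have idx := fun r hr => hIdx r (List.mem_cons_of_mem q hr)
      rw [List.foldl_cons, List.foldl_cons]
      cases hsp : PySem.Str.split? q.2 "=" with
      | none =>
        have h1 : pass2Step lr lv (b, p) q = (b, p) := by
          simp only [pass2Step]; rw [if_neg hminus, hsp]
        have h2 : pass2Step (lr.insert l n) lv (b', p') q = (b', p') := by
          simp only [pass2Step]; rw [if_neg hminus, hsp]
        rw [h1, h2]
        exact ih idx b b' p p' hlen hb' hp hpl
      | some parts =>
        match parts with
        | [] =>
          have h1 : pass2Step lr lv (b, p) q = (b, p) := by
            simp only [pass2Step]; rw [if_neg hminus, hsp]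
          have h2 : pass2Step (lr.insert l n) lv (b', p') q = (b', p') := by
            simp only [pass2Step]; rw [if_neg hminus, hsp]
          rw [h1, h2]
          exact ih idx b b' p p' hlen hb' hp hpl
        | label :: rest =>
          have h1 : pass2Step lr lv (b, p) q
              = if PySem.Set.contains p label = false ∧ q.1 > lr.getD label (-1) then
                  (b.set (hashB label)
                    ((b.getD (hashB label) PySem.Dict.empty).insert label (lv.getD label 0)),
                   PySem.Set.add p label)
                else (b, p) := by
            simp only [pass2Step]; rw [if_neg hminus, hsp]
          have h2 : pass2Step (lr.insert l n) lv (b', p') q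
              = if PySem.Set.contains p' label = false
                    ∧ q.1 > (lr.insert l n).getD label (-1) then
                  (b'.set (hashB label)
                    ((b'.getD (hashB label) PySem.Dict.empty).insert label (lv.getD label 0)),
                   PySem.Set.add p' label)
                else (b', p') := by
            simp only [pass2Step]; rw [if_neg hminus, hsp]
          by_cases hlab : label = l
          · subst hlab
            have hqn : q.1 < n := hIdx q List.mem_cons_self
            have hcond2 : ¬ (PySem.Set.contains p' label = false
                ∧ q.1 > (lr.insert label n).getD label (-1)) := by
              rintro ⟨-, hgt⟩
              rw [PySem.Dict.getD_insert_self] at hgt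
              omega
            rw [h2, if_neg hcond2]
            by_cases hcond1 : PySem.Set.contains p label = false ∧ q.1 > lr.getD label (-1)
            · rw [h1, if_pos hcond1]
              refine ih idx _ _ _ _ ?_ ?_ ?_ ?_
              · rw [List.length_set]; exact hlen
              · rw [hashB_eq, listGetDSetSelf b _ _ _ (hlen ▸ hash_lt label),
                  dictEraseInsertSelf, List.set_set]
                exact hb'
              · intro m hm
                rw [setContainsAdd, hp m hm]
                have : decide (m = label) = false := by simp [hm]
                rw [this, Bool.false_or]
              · exact hpl
            · rw [h1, if_neg hcond1]
              exact ih idx b b' p p' hlen hb' hp hpl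
          · have hcondeq : (PySem.Set.contains p' label = false
                  ∧ q.1 > (lr.insert l n).getD label (-1))
                ↔ (PySem.Set.contains p label = false ∧ q.1 > lr.getD label (-1)) := by
              rw [PySem.Dict.getD_insert_of_ne lr _ _ hlab, hp label hlab]
            by_cases hcond1 : PySem.Set.contains p label = false ∧ q.1 > lr.getD label (-1)
            · rw [h1, if_pos hcond1, h2, if_pos (hcondeq.mpr hcond1)]
              refine ih idx _ _ _ _ ?_ ?_ ?_ ?_
              · rw [List.length_set]; exact hlen
              · rw [hashB_eq, hb']
                exact boxRelRem b hlen l label _ hlab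
              · intro m hm
                rw [setContainsAdd, setContainsAdd, hp m hm]
              · rw [setContainsAdd, hpl]
                have : decide (l = label) = false := by simp [Ne.symm hlab]
                rw [this, Bool.false_or]
            · rw [h1, if_neg hcond1, h2, if_neg (fun hx => hcond1 (hcondeq.mp hx))]
              exact ih idx b b' p p' hlen hb' hp hpl

-- the pass-2 relation maintained while a final install op is appended
theorem insRun (lr lv : PySem.Dict String Int) (l : String) (v : Int)
    (L : List (Int × String)) :
    ∀ (b b' : List (PySem.Dict String Int)) (p : PySem.Set String),
      b.length = 256 →
      b' = (if p.contains l = true then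
        b.set (get_hash_value l) ((b.getD (get_hash_value l) PySem.Dict.empty).insert l v)
        else b) →
      (p.contains l = true →
        ((b.getD (get_hash_value l) PySem.Dict.empty).contains l) = true) →
      (L.foldl (pass2Step lr (lv.insert l v)) (b', p)).2
          = (L.foldl (pass2Step lr lv) (b, p)).2
      ∧ (L.foldl (pass2Step lr (lv.insert l v)) (b', p)).1
          = (if (L.foldl (pass2Step lr lv) (b, p)).2.contains l = true then
              (L.foldl (pass2Step lr lv) (b, p)).1.set (get_hash_value l)
                (((L.foldl (pass2Step lr lv) (b, p)).1.getD (get_hash_value l)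
                    PySem.Dict.empty).insert l v)
             else (L.foldl (pass2Step lr lv) (b, p)).1)
      ∧ ((L.foldl (pass2Step lr lv) (b, p)).2.contains l = true →
          (((L.foldl (pass2Step lr lv) (b, p)).1.getD (get_hash_value l)
              PySem.Dict.empty).contains l) = true)
      ∧ (L.foldl (pass2Step lr lv) (b, p)).1.length = 256 := by
  induction L with
  | nil => intro b b' p hlen hb' hbox; exact ⟨rfl, hb', hbox, hlen⟩
  | cons q L ih =>
    intro b b' p hlen hb' hbox
    have hH : get_hash_value l < 256 := hash_lt l
    by_cases hminus : PySem.Str.pyGet? q.2 (-1) = some '-'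
    · rw [List.foldl_cons, List.foldl_cons, pass2Step_rem _ _ _ _ hminus,
        pass2Step_rem _ _ _ _ hminus]
      exact ih b b' p hlen hb' hbox
    · rw [List.foldl_cons, List.foldl_cons]
      cases hsp : PySem.Str.split? q.2 "=" with
      | none =>
        have h1 : pass2Step lr lv (b, p) q = (b, p) := by
          simp only [pass2Step]; rw [if_neg hminus, hsp]
        have h2 : pass2Step lr (lv.insert l v) (b', p) q = (b', p) := by
          simp only [pass2Step]; rw [if_neg hminus, hsp]
        rw [h1, h2]
        exact ih b b' p hlen hb' hbox
      | some parts =>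
        match parts with
        | [] =>
          have h1 : pass2Step lr lv (b, p) q = (b, p) := by
            simp only [pass2Step]; rw [if_neg hminus, hsp]
          have h2 : pass2Step lr (lv.insert l v) (b', p) q = (b', p) := by
            simp only [pass2Step]; rw [if_neg hminus, hsp]
          rw [h1, h2]
          exact ih b b' p hlen hb' hbox
        | label :: rest =>
          have h1 : pass2Step lr lv (b, p) q
              = if PySem.Set.contains p label = false ∧ q.1 > lr.getD label (-1) then
                  (b.set (hashB label)
                    ((b.getD (hashB label) PySem.Dict.empty).insert label (lv.getD label 0)),
                   PySem.Set.add p label)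
                else (b, p) := by
            simp only [pass2Step]; rw [if_neg hminus, hsp]
          have h2 : pass2Step lr (lv.insert l v) (b', p) q
              = if PySem.Set.contains p label = false ∧ q.1 > lr.getD label (-1) then
                  (b'.set (hashB label)
                    ((b'.getD (hashB label) PySem.Dict.empty).insert label
                      ((lv.insert l v).getD label 0)),
                   PySem.Set.add p label)
                else (b', p) := by
            simp only [pass2Step]; rw [if_neg hminus, hsp]
          by_cases hcond : PySem.Set.contains p label = false ∧ q.1 > lr.getD label (-1)
          · rw [h1, if_pos hcond, h2, if_pos hcond]
            by_cases hlab : label = l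
            · subst hlab
              have hpl : PySem.Set.contains p label = false := hcond.1
              have hb'b : b' = b := by rw [hb', if_neg]; rw [hpl]; simp
              refine ih _ _ _ ?_ ?_ ?_
              · rw [List.length_set]; exact hlen
              · have hcl : (PySem.Set.add p label).contains label = true := by
                  rw [setContainsAdd]; simp
                rw [hcl, if_pos rfl, PySem.Dict.getD_insert_self, hashB_eq,
                  listGetDSetSelf b _ _ _ (hlen ▸ hash_lt label), List.set_set,
                  PySem.Dict.insert_insert_self, hb'b]
              · intro _
                rw [hashB_eq, listGetDSetSelf b _ _ _ (hlen ▸ hash_lt label)]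
                exact PySem.Dict.contains_insert_self _ _ _
            · have hval : (lv.insert l v).getD label 0 = lv.getD label 0 :=
                PySem.Dict.getD_insert_of_ne lv _ _ hlab
              have hpadd : (PySem.Set.add p label).contains l = PySem.Set.contains p l := by
                rw [setContainsAdd]
                have : decide (l = label) = false := by simp [Ne.symm hlab]
                rw [this, Bool.false_or]
              refine ih _ _ _ ?_ ?_ ?_
              · rw [List.length_set]; exact hlen
              · rw [hval, hpadd]
                by_cases hc : PySem.Set.contains p l = true
                · rw [hc, if_pos rfl]
                  rw [hc, if_pos rfl] at hb'
                  rw [hashB_eq, hb']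
                  exact boxRelIns b hlen l label v _ hlab (hbox hc)
                · have hcf : PySem.Set.contains p l = false := by simpa using hc
                  rw [hcf]
                  rw [hcf, if_neg (by simp)] at hb'
                  rw [hb', if_neg (by simp)]
              · intro hplc
                rw [hpadd] at hplc
                have hX := hbox hplc
                rw [hashB_eq]
                by_cases hK : get_hash_value label = get_hash_value l
                · rw [hK, listGetDSetSelf b _ _ _ (hlen ▸ hash_lt l),
                    dictContainsInsertNe _ _ _ _ (Ne.symm hlab)]
                  exact hX
                · rw [listGetDSetNe b _ _ _ _ hK]
                  exact hX
          · rw [h1, if_neg hcond, h2, if_neg hcond]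
            exact ih b b' p hlen hb' hbox

-- every last-removal index recorded by pass 1 is below the list length
theorem pass1Bound (n : Int) (L : List (Int × String)) (hIdx : ∀ q ∈ L, q.1 < n) :
    ∀ st : PySem.Dict String Int × PySem.Dict String Int,
      (∀ m, st.1.getD m (-1) < n) → ∀ m, (L.foldl pass1Step st).1.getD m (-1) < n := by
  induction L with
  | nil => intro st h m; exact h m
  | cons q L ih =>
    intro st h m
    refine ih (fun r hr => hIdx r (List.mem_cons_of_mem _ hr)) _ ?_ m
    intro m'
    by_cases hminus : PySem.Str.pyGet? q.2 (-1) = some '-'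
    · simp only [pass1Step, hminus, if_pos]
      rw [PySem.Dict.getD_insert]
      split
      · exact hIdx q (List.mem_cons_self)
      · exact h m'
    · simp only [pass1Step, hminus, if_neg, not_false_iff]
      cases hsp : PySem.Str.split? q.2 "=" with
      | none => exact h m'
      | some parts =>
        match parts with
        | [] => exact h m'
        | [_] => exact h m'
        | [_, _] => exact h m'
        | _ :: _ :: _ :: _ => exact h m'

theorem getD_B0 (i : Nat) (d : PySem.Dict String Int) (h : i < 256) :
    (List.replicate 256 (PySem.Dict.empty : PySem.Dict String Int)).getD i d
      = PySem.Dict.empty := by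
  rw [List.getD, List.getElem?_replicate]
  simp [h]

set_option maxHeartbeats 2000000 in
theorem mainRun (es : List String) (hpre : Pre_box_lenses es) :
    ((PySem.List.enumerate es).foldl
        (pass2Step ((PySem.List.enumerate es).foldl pass1Step
            (PySem.Dict.empty, PySem.Dict.empty)).1
          ((PySem.List.enumerate es).foldl pass1Step
            (PySem.Dict.empty, PySem.Dict.empty)).2)
        (List.replicate 256 PySem.Dict.empty, PySem.Set.empty)).1
      = es.foldl boxStepA (List.replicate 256 PySem.Dict.empty) := by
  induction es using List.reverseRecOn with
  | nil => rfl
  | append_singleton es e ih =>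
    have hpre' : Pre_box_lenses es := fun eq hm => hpre eq (List.mem_append_left _ hm)
    obtain ⟨hne, hshape⟩ := hpre e (List.mem_append_right _ List.mem_cons_self)
    have henum : PySem.List.enumerate (es ++ [e]) 0
        = PySem.List.enumerate es 0 ++ [((es.length : Int), e)] := by
      rw [PySem.List.enumerate_append]
      simp [PySem.List.enumerate]
    have hIdx : ∀ q ∈ PySem.List.enumerate es 0, q.1 < (es.length : Int) := by
      intro q hq
      obtain ⟨k, hk, rfl⟩ := (PySem.List.mem_enumerate_iff es 0 q).mp hq
      simp
      omega
    set env := (PySem.List.enumerate es).foldl pass1Step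
      (PySem.Dict.empty, PySem.Dict.empty) with henv
    have hlen0 : (List.replicate 256 (PySem.Dict.empty : PySem.Dict String Int)).length
        = 256 := List.length_replicate
    by_cases hminus : PySem.Str.pyGet? e (-1) = some '-'
    · -- removal equation: pass 1 records the index, pass 2 skips it
      set l := PySem.Str.slice e none (some (-1)) with hl
      have hstep1a : (pass1Step env ((es.length : Int), e)).1
          = env.1.insert l (es.length : Int) := by
        simp only [pass1Step]
        rw [if_pos hminus]
      have hstep1b : (pass1Step env ((es.length : Int), e)).2 = env.2 := by
        simp only [pass1Step]
        rw [if_pos hminus]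
      have hrel := remRun env.1 env.2 l (es.length : Int) (PySem.List.enumerate es 0) hIdx
        (List.replicate 256 PySem.Dict.empty) (List.replicate 256 PySem.Dict.empty)
        PySem.Set.empty PySem.Set.empty hlen0
        (by rw [getD_B0 _ _ (hash_lt l)]
            have he : (PySem.Dict.empty : PySem.Dict String Int).erase l
                = PySem.Dict.empty := rfl
            rw [he, List.set_replicate_self])
        (fun _ _ => rfl) rfl
      rw [henum]
      simp only [List.foldl_append, List.foldl_cons, List.foldl_nil]
      rw [hstep1a, hstep1b]
      have hskip : ∀ st, pass2Step (env.1.insert l (es.length : Int)) env.2 st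
          ((es.length : Int), e) = st := fun st => pass2Step_rem _ _ st _ hminus
      rw [hskip]
      rw [hrel.1]
      show _ = boxStepA (es.foldl boxStepA _) e
      simp only [boxStepA]
      rw [if_pos hminus, ih hpre']
    · -- install equation: pass 1 records the focal, pass 2 may place the label here
      have hok : eqOk e = true := hshape.resolve_left hminus
      unfold eqOk at hok
      rcases hsp : PySem.Str.split? e "=" with _ | parts
      · rw [hsp] at hok; exact absurd hok (by simp)
      rw [hsp] at hok
      match parts, hok with
      | [label, focal], hok =>
      set v := (PySem.Int.ofStr? focal).getD 0 with hv
      have hstep1a : (pass1Step env ((es.length : Int), e)).1 = env.1 := by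
        simp only [pass1Step]
        rw [if_neg hminus, hsp]
      have hstep1b : (pass1Step env ((es.length : Int), e)).2 = env.2.insert label v := by
        simp only [pass1Step]
        rw [if_neg hminus, hsp]
      have hrel := insRun env.1 env.2 label v (PySem.List.enumerate es 0)
        (List.replicate 256 PySem.Dict.empty) (List.replicate 256 PySem.Dict.empty)
        PySem.Set.empty hlen0 (by rw [if_neg]; simp [PySem.Set.contains, PySem.Set.empty])
        (by intro hc; exact absurd hc (by simp [PySem.Set.contains, PySem.Set.empty]))
      rw [henum]
      simp only [List.foldl_append, List.foldl_cons, List.foldl_nil]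
      rw [hstep1a, hstep1b]
      set r := (PySem.List.enumerate es 0).foldl (pass2Step env.1 env.2)
        (List.replicate 256 PySem.Dict.empty, PySem.Set.empty) with hr
      set r' := (PySem.List.enumerate es 0).foldl (pass2Step env.1 (env.2.insert label v))
        (List.replicate 256 PySem.Dict.empty, PySem.Set.empty) with hr'
      obtain ⟨hset, hbox, hboxc, hlen⟩ := hrel
      have hcondab : (es.length : Int) > env.1.getD label (-1) := by
        refine pass1Bound (es.length : Int) (PySem.List.enumerate es 0) hIdx
          (PySem.Dict.empty, PySem.Dict.empty) ?_ label
        intro m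
        rw [PySem.Dict.getD_empty]
        omega
      have hgoalA : boxStepA (List.foldl boxStepA (List.replicate 256 PySem.Dict.empty) es) e
          = r.1.set (get_hash_value label)
              ((r.1.getD (get_hash_value label) PySem.Dict.empty).insert label v) := by
        rw [← ih hpre']
        simp only [boxStepA]
        rw [if_neg hminus, hsp]
      rw [hgoalA]
      have hstep2 : pass2Step env.1 (env.2.insert label v) r' ((es.length : Int), e)
          = if PySem.Set.contains r'.2 label = false
                ∧ (es.length : Int) > env.1.getD label (-1) then
              (r'.1.set (hashB label)
                ((r'.1.getD (hashB label) PySem.Dict.empty).insert label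
                  ((env.2.insert label v).getD label 0)),
               PySem.Set.add r'.2 label)
            else r' := by
        simp only [pass2Step]
        rw [if_neg hminus, hsp]
      rw [hstep2]
      by_cases hc : PySem.Set.contains r.2 label = true
      · rw [if_neg ?_]
        · rw [hbox, if_pos hc]
        · rintro ⟨h1, -⟩
          rw [hset] at h1
          rw [h1] at hc
          exact Bool.false_ne_true hc
      · have hcf : PySem.Set.contains r.2 label = false := by
          simpa using hc
        rw [if_pos ⟨by rw [hset]; exact hcf, hcondab⟩, PySem.Dict.getD_insert_self,
          hbox, if_neg (by rw [hcf]; exact Bool.false_ne_true)]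
        rfl
-- ===== VERDICT (by name: the statement is the Claim_ definition above) =====
theorem box_lenses_spec : Claim_equal_box_lenses := by
  intro es _ hpre
  have halt : box_lenses_alt es = ((PySem.List.enumerate es).foldl
      (pass2Step ((PySem.List.enumerate es).foldl pass1Step
          (PySem.Dict.empty, PySem.Dict.empty)).1
        ((PySem.List.enumerate es).foldl pass1Step
          (PySem.Dict.empty, PySem.Dict.empty)).2)
      (List.replicate 256 PySem.Dict.empty, PySem.Set.empty)).1.map PySem.Dict.items := rfl
  unfold Spec_box_lenses box_lenses
  rw [halt, mainRun es hpre]
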